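-- pv_equiv track=rewrite | github.com/bdavis222/dot-scanner | dotscanner/dataprocessing.py | coordExistsWithinRadius
-- ===== SOURCE A (Python) =====
-- def coordExistsWithinRadius(y, x, coordMap, radius):
-- 	yRange = range(y - radius, y + radius + 1)
-- 	xRange = range(x - radius, x + radius + 1)
-- 	for currentY in yRange:
-- 		if currentY in coordMap:
-- 			for currentX in xRange:
-- 				if currentX in coordMap[currentY]:
-- 					return True
-- 	return False
-- ===== SOURCE B (Python) =====
-- def coordExistsWithinRadius(y, x, coordMap, radius):
-- 	for currentY in coordMap:
-- 		if abs(currentY - y) <= radius: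
-- 			for currentX in coordMap[currentY]:
-- 				if abs(currentX - x) <= radius:
-- 					return True
-- 	return False
-- ===== Notes on version B (the rewrite author's own statement) =====
-- stated objective: faster
-- what changed: B iterates over the keys and coordinates actually stored in coordMap and tests |distance| <= radius, instead of enumerating every cell of the (2*radius+1)^2 candidate square and testing membership.
import Mathlib
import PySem

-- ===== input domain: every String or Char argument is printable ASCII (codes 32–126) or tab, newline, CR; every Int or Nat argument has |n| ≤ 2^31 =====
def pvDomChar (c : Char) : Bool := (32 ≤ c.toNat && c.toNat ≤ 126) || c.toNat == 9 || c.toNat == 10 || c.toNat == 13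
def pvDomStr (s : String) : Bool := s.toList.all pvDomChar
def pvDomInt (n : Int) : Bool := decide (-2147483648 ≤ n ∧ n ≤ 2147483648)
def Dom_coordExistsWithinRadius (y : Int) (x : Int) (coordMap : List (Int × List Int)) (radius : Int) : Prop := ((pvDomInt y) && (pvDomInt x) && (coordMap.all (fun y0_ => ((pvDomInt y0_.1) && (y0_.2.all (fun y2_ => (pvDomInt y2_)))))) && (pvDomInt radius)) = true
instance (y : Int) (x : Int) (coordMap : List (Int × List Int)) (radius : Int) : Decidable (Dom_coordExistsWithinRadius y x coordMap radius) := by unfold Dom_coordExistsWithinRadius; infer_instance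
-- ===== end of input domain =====

-- B iterates the entries actually stored in coordMap and tests |distance| ≤ radius, instead of
-- scanning every cell of the (2*radius+1)^2 candidate square; objective: faster for large radius.

-- ===== PORT A =====
-- inner loop of A: 'for currentX in xRange: if currentX in coordMap[currentY]: return True'
def pvInnerA (xRange : List Int) (xs : List Int) : Bool :=
  match xRange with
  | [] => false
  | currentX :: rest => if xs.contains currentX then true else pvInnerA rest xs

-- outer loop of A: 'for currentY in yRange: if currentY in coordMap: <inner loop>'
-- ('currentY in coordMap' followed by 'coordMap[currentY]' is the first-match lookup Dict.get?)
def pvOuterA (yRange : List Int) (xRange : List Int) (coordMap : List (Int × List Int)) : Bool :=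
  match yRange with
  | [] => false
  | currentY :: rest =>
    match (PySem.Dict.mk coordMap).get? currentY with
    | some xs => if pvInnerA xRange xs then true else pvOuterA rest xRange coordMap
    | none => pvOuterA rest xRange coordMap

def coordExistsWithinRadius (y : Int) (x : Int) (coordMap : List (Int × List Int)) (radius : Int) : Bool :=
  let yRange := PySem.List.pyRange (y - radius) (y + radius + 1) 1
  let xRange := PySem.List.pyRange (x - radius) (x + radius + 1) 1
  pvOuterA yRange xRange coordMap

-- ===== PORT B =====
-- inner loop of B: 'for currentX in coordMap[currentY]: if abs(currentX - x) <= radius: return True'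
def pvInnerB (x : Int) (radius : Int) (xs : List Int) : Bool :=
  match xs with
  | [] => false
  | currentX :: rest => if |currentX - x| ≤ radius then true else pvInnerB x radius rest

-- outer loop of B: 'for currentY in coordMap: if abs(currentY - y) <= radius: <inner loop>'
-- (iteration over the dict yields its keys; coordMap[currentY] is the first-match lookup)
def pvOuterB (y : Int) (x : Int) (radius : Int) (keys : List Int) (coordMap : List (Int × List Int)) : Bool :=
  match keys with
  | [] => false
  | currentY :: rest =>
    if |currentY - y| ≤ radius then
      if pvInnerB x radius (((PySem.Dict.mk coordMap).get? currentY).getD []) then true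
      else pvOuterB y x radius rest coordMap
    else pvOuterB y x radius rest coordMap

def coordExistsWithinRadius_alt (y : Int) (x : Int) (coordMap : List (Int × List Int)) (radius : Int) : Bool :=
  pvOuterB y x radius (coordMap.map Prod.fst) coordMap

-- ===== PRECONDITION & SPEC =====
def Spec_coordExistsWithinRadius (y : Int) (x : Int) (coordMap : List (Int × List Int)) (radius : Int) (out : Bool) : Prop := out = coordExistsWithinRadius_alt y x coordMap radius
instance (y : Int) (x : Int) (coordMap : List (Int × List Int)) (radius : Int) (out : Bool) : Decidable (Spec_coordExistsWithinRadius y x coordMap radius out) := by unfold Spec_coordExistsWithinRadius; infer_instance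

-- ===== CLAIM (what is proved, stated in full; the proofs are below) =====
def Claim_equal_coordExistsWithinRadius : Prop := ∀ (y : Int) (x : Int) (coordMap : List (Int × List Int)) (radius : Int), Dom_coordExistsWithinRadius y x coordMap radius → Spec_coordExistsWithinRadius y x coordMap radius (coordExistsWithinRadius y x coordMap radius)

-- ===== LEMMAS AND PROOFS =====

theorem pvInnerA_iff (xRange xs : List Int) :
    pvInnerA xRange xs = true ↔ ∃ cx ∈ xRange, cx ∈ xs := by
  induction xRange with
  | nil => simp [pvInnerA]
  | cons hd tl ih =>
    simp only [pvInnerA, List.mem_cons]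
    by_cases h : hd ∈ xs
    · simp [h]
    · simp [h, ih]

theorem pvOuterA_iff (yRange xRange : List Int) (m : List (Int × List Int)) :
    pvOuterA yRange xRange m = true ↔
      ∃ cy ∈ yRange, ∃ xs, (PySem.Dict.mk m).get? cy = some xs ∧ pvInnerA xRange xs = true := by
  induction yRange with
  | nil => simp [pvOuterA]
  | cons hd tl ih =>
    simp only [pvOuterA, List.mem_cons]
    cases hg : (PySem.Dict.mk m).get? hd with
    | none =>
      rw [ih]
      constructor
      · rintro ⟨cy, hcy, rest⟩; exact ⟨cy, Or.inr hcy, rest⟩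
      · rintro ⟨cy, hcy | hcy, xs, hx, hin⟩
        · exact absurd hx (by rw [hcy, hg]; simp)
        · exact ⟨cy, hcy, xs, hx, hin⟩
    | some xs =>
      by_cases h : pvInnerA xRange xs = true
      · simp only [h, if_true]
        exact iff_of_true (by simp) ⟨hd, Or.inl rfl, xs, hg, h⟩
      · simp only [h, if_false, Bool.false_eq_true, ih]
        constructor
        · rintro ⟨cy, hcy, rest⟩; exact ⟨cy, Or.inr hcy, rest⟩
        · rintro ⟨cy, hcy | hcy, xs', hx, hin⟩
          · rw [hcy, hg] at hx; cases hx; exact absurd hin h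
          · exact ⟨cy, hcy, xs', hx, hin⟩

theorem pvInnerB_iff (x radius : Int) (xs : List Int) :
    pvInnerB x radius xs = true ↔ ∃ cx ∈ xs, |cx - x| ≤ radius := by
  induction xs with
  | nil => simp [pvInnerB]
  | cons hd tl ih =>
    simp only [pvInnerB, List.mem_cons]
    by_cases h : |hd - x| ≤ radius
    · simp [h]
    · simp [h, ih]

theorem pvOuterB_iff (y x radius : Int) (keys : List Int) (m : List (Int × List Int)) :
    pvOuterB y x radius keys m = true ↔
      ∃ cy ∈ keys, |cy - y| ≤ radius ∧
        pvInnerB x radius (((PySem.Dict.mk m).get? cy).getD []) = true := by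
  induction keys with
  | nil => simp [pvOuterB]
  | cons hd tl ih =>
    simp only [pvOuterB, List.mem_cons]
    by_cases h : |hd - y| ≤ radius
    · by_cases h2 : pvInnerB x radius (((PySem.Dict.mk m).get? hd).getD []) = true
      · simp only [h, if_true, h2]
        exact iff_of_true (by simp) ⟨hd, Or.inl rfl, h, h2⟩
      · simp only [h, if_true, h2, if_false, Bool.false_eq_true, ih]
        constructor
        · rintro ⟨cy, hcy, rest⟩; exact ⟨cy, Or.inr hcy, rest⟩
        · rintro ⟨cy, hcy | hcy, ha, hb⟩
          · rw [hcy] at hb; exact absurd hb h2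
          · exact ⟨cy, hcy, ha, hb⟩
    · simp only [h, if_false, ih]
      constructor
      · rintro ⟨cy, hcy, rest⟩; exact ⟨cy, Or.inr hcy, rest⟩
      · rintro ⟨cy, hcy | hcy, ha, hb⟩
        · rw [hcy] at ha; exact absurd ha h
        · exact ⟨cy, hcy, ha, hb⟩

-- a key is in the dict's key list iff first-match lookup succeeds
theorem pvGetSome_iff_mem_fst (m : List (Int × List Int)) (k : Int) :
    (∃ xs, (PySem.Dict.mk m).get? k = some xs) ↔ k ∈ m.map Prod.fst := by
  rw [← Option.isSome_iff_exists, Option.isSome_iff_ne_none]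
  constructor
  · intro h
    by_contra hk
    exact h ((PySem.Dict.get?_eq_none_iff_not_mem_keys _ _).mpr (by simpa using hk))
  · intro hk hnone
    exact (PySem.Dict.get?_eq_none_iff_not_mem_keys _ _).mp hnone (by simpa using hk)

-- ===== VERDICT (by name: the statement is the Claim_ definition above) =====
theorem coordExistsWithinRadius_spec : Claim_equal_coordExistsWithinRadius := by
  intro y x m radius _
  unfold Spec_coordExistsWithinRadius coordExistsWithinRadius coordExistsWithinRadius_alt
  rw [Bool.eq_iff_iff, pvOuterA_iff, pvOuterB_iff]
  constructor
  · rintro ⟨cy, hcy, xs, hget, hin⟩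
    rw [PySem.List.mem_pyRange_one] at hcy
    refine ⟨cy, (pvGetSome_iff_mem_fst m cy).mp ⟨xs, hget⟩, by rw [abs_le]; omega, ?_⟩
    rw [hget]
    rw [pvInnerA_iff] at hin
    obtain ⟨cx, hcxr, hcxm⟩ := hin
    rw [PySem.List.mem_pyRange_one] at hcxr
    exact (pvInnerB_iff x radius xs).mpr ⟨cx, hcxm, by rw [abs_le]; omega⟩
  · rintro ⟨cy, hcy, hrad, hin⟩
    obtain ⟨xs, hget⟩ := (pvGetSome_iff_mem_fst m cy).mpr hcy
    rw [hget] at hin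
    rw [pvInnerB_iff] at hin
    obtain ⟨cx, hcxm, hcxr⟩ := hin
    rw [abs_le] at hrad hcxr
    refine ⟨cy, PySem.List.mem_pyRange_one.mpr (by omega), xs, hget, ?_⟩
    exact (pvInnerA_iff _ _).mpr ⟨cx, PySem.List.mem_pyRange_one.mpr (by omega), hcxm⟩
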